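-- pv_equiv track=rewrite | github.com/TFG-UCM-VQA/VQA-TFG | image_recuperation/image_tag_utils.py | size_set_similarity
-- ===== SOURCE A (Python) =====
-- def size_set_similarity(tagsA, tagsB, sizeA, sizeB):
--     all_tags = list(dict.fromkeys(tagsA+tagsB))
--     AintB = 0
--     for tag in all_tags:
--         nA = sum([sizeA[i] if tagsA[i] == tag else 0 for i in range(len(tagsA))])
--         nB = sum([sizeB[i] if tagsB[i] == tag else 0 for i in range(len(tagsB))])
--         AintB += min(nA,nB)
--     return AintB
-- ===== SOURCE B (Python) =====
-- def size_set_similarity(tagsA, tagsB, sizeA, sizeB):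
--     def tally(tags, sizes):
--         d = {}
--         for i, t in enumerate(tags):
--             d[t] = d.get(t, 0) + sizes[i]
--         return d
--     dA = tally(tagsA, sizeA)
--     dB = tally(tagsB, sizeB)
--     return sum(min(dA.get(t, 0), dB.get(t, 0)) for t in dA.keys() | dB.keys())
-- ===== Notes on version B (the rewrite author's own statement) =====
-- stated objective: faster
-- what changed: Instead of re-scanning both full tag lists for every distinct tag, B builds a tag->size-sum dict for each side in one indexed pass and sums min of the two lookups over the union of keys.
import Mathlib
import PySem

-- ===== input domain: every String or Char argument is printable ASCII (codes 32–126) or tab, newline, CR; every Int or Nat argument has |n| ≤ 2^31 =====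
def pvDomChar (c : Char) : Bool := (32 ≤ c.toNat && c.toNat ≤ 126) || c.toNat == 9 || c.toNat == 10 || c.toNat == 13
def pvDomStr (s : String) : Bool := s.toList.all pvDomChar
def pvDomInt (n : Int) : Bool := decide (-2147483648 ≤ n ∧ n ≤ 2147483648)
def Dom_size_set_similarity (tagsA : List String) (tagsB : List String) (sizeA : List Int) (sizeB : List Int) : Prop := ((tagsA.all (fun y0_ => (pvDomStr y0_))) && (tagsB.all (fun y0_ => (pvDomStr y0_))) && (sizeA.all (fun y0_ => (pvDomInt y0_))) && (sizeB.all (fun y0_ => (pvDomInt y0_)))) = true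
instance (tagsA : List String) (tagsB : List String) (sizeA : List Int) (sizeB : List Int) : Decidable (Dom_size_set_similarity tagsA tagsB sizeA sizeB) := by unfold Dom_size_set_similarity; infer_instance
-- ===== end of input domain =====

-- B replaces A's per-distinct-tag rescans of both tag lists by two one-pass tag→size-sum
-- dicts and a single pass over the union of their keys (asymptotically faster).

-- ===== PORT A =====
-- 'sum([sizes[i] if tags[i] == tag else 0 for i in range(len(tags))])'
def pvSumMatch (tags : List String) (sizes : List Int) (tag : String) : Int :=
  ((PySem.List.pyRange 0 (tags.length : Int) 1).map
    (fun i => if PySem.List.pyGetD tags i "" == tag then PySem.List.pyGetD sizes i 0 else 0)).sum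

def size_set_similarity (tagsA : List String) (tagsB : List String) (sizeA : List Int) (sizeB : List Int) : Int :=
  (PySem.List.dedup (tagsA ++ tagsB)).foldl
    (fun acc tag => acc + min (pvSumMatch tagsA sizeA tag) (pvSumMatch tagsB sizeB tag)) 0

-- ===== PORT B =====
-- 'for i, t in enumerate(tags): d[t] = d.get(t, 0) + sizes[i]'
-- (pyGetD is exact here: under Pre_ every index of enumerate(tags) is in range for sizes)
def pvSumDict (tags : List String) (sizes : List Int) : PySem.Dict String Int :=
  (PySem.List.enumerate tags).foldl
    (fun d p => d.insert p.2 (d.getD p.2 0 + PySem.List.pyGetD sizes p.1 0)) PySem.Dict.empty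

def size_set_similarity_alt (tagsA : List String) (tagsB : List String) (sizeA : List Int) (sizeB : List Int) : Int :=
  let dA := pvSumDict tagsA sizeA
  let dB := pvSumDict tagsB sizeB
  (PySem.Set.union (PySem.Set.ofList dA.keys) dB.keys).foldl
    (fun acc t => acc + min (dA.getD t 0) (dB.getD t 0)) 0

-- ===== PRECONDITION & SPEC =====
-- Both A and B index sizeA/sizeB at every index of tagsA/tagsB, so both raise IndexError
-- exactly when a tag list is longer than its size list; those inputs are excluded.
def Pre_size_set_similarity (tagsA : List String) (tagsB : List String) (sizeA : List Int) (sizeB : List Int) : Prop :=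
  tagsA.length ≤ sizeA.length ∧ tagsB.length ≤ sizeB.length
instance (tagsA : List String) (tagsB : List String) (sizeA : List Int) (sizeB : List Int) : Decidable (Pre_size_set_similarity tagsA tagsB sizeA sizeB) := by unfold Pre_size_set_similarity; infer_instance

def pvWitness_size_set_similarity : List String × List String × List Int × List Int :=
  (["a", "b"], ["a"], [1, 2], [3])

def Spec_size_set_similarity (tagsA : List String) (tagsB : List String) (sizeA : List Int) (sizeB : List Int) (out : Int) : Prop := out = size_set_similarity_alt tagsA tagsB sizeA sizeB
instance (tagsA : List String) (tagsB : List String) (sizeA : List Int) (sizeB : List Int) (out : Int) : Decidable (Spec_size_set_similarity tagsA tagsB sizeA sizeB out) := by unfold Spec_size_set_similarity; infer_instance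

-- ===== CLAIM (what is proved, stated in full; the proofs are below) =====
def Claim_equal_size_set_similarity : Prop := ∀ (tagsA : List String) (tagsB : List String) (sizeA : List Int) (sizeB : List Int), Dom_size_set_similarity tagsA tagsB sizeA sizeB → Pre_size_set_similarity tagsA tagsB sizeA sizeB → Spec_size_set_similarity tagsA tagsB sizeA sizeB (size_set_similarity tagsA tagsB sizeA sizeB)

-- ===== LEMMAS AND PROOFS =====

-- getD of the running-sum dict fold: read off the accumulated sum of matching values.
theorem pv_getD_sumFold {α : Type} (l : List α) (key : α → String) (val : α → Int)
    (d : PySem.Dict String Int) (t : String) :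
    (l.foldl (fun d x => d.insert (key x) (d.getD (key x) 0 + val x)) d).getD t 0
      = d.getD t 0 + (l.map (fun x => if key x == t then val x else 0)).sum := by
  induction l generalizing d with
  | nil => simp
  | cons x rest ih =>
    simp only [List.foldl_cons, ih, PySem.Dict.getD_insert, List.map_cons, List.sum_cons]
    by_cases h : t = key x
    · simp [h]; ring
    · have h' : (key x == t) = false := by simp [Ne.symm h]
      simp [h, h']

-- the dict lookup equals A's inner comprehension sum.
theorem pv_sumMatch_eq_dict (tags : List String) (sizes : List Int) (tag : String) :
    pvSumMatch tags sizes tag = (pvSumDict tags sizes).getD tag 0 := by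
  unfold pvSumMatch pvSumDict
  rw [pv_getD_sumFold, PySem.Dict.getD_empty, zero_add,
    PySem.List.enumerate_eq_map_pyRange (d := ""), List.map_map]
  rfl

-- keys of the running-sum dict are the distinct tags, in first-occurrence order.
theorem pv_keys_sumDict (tags : List String) (sizes : List Int) :
    (pvSumDict tags sizes).keys = PySem.Set.ofList tags := by
  unfold pvSumDict
  rw [PySem.Dict.keys_foldl_insert_key (PySem.List.enumerate tags) Prod.snd
    (fun d p => d.getD p.2 0 + PySem.List.pyGetD sizes p.1 0) PySem.Dict.empty,
    PySem.Dict.keys_empty, PySem.Set.update_nil_left, PySem.List.map_snd_enumerate]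

theorem size_set_similarity_spec : Claim_equal_size_set_similarity := by
  intro tagsA tagsB sizeA sizeB _ _
  unfold Spec_size_set_similarity size_set_similarity size_set_similarity_alt
  set dA := pvSumDict tagsA sizeA with hdA
  set dB := pvSumDict tagsB sizeB with hdB
  set g : String → Int := fun t => min (dA.getD t 0) (dB.getD t 0) with hg
  -- both loops are sums of g over a nodup list of the distinct tags
  have hcong : (PySem.List.dedup (tagsA ++ tagsB)).foldl
      (fun acc tag => acc + min (pvSumMatch tagsA sizeA tag) (pvSumMatch tagsB sizeB tag)) 0
      = (PySem.List.dedup (tagsA ++ tagsB)).foldl (fun acc tag => acc + g tag) 0 := by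
    apply PySem.List.foldl_congr_mem
    intro acc t _
    rw [pv_sumMatch_eq_dict tagsA sizeA t, pv_sumMatch_eq_dict tagsB sizeB t]
  rw [hcong, PySem.List.foldl_add, PySem.List.foldl_add]
  -- the two key lists are permutations of each other
  have hperm : (PySem.List.dedup (tagsA ++ tagsB)).Perm
      (PySem.Set.union (PySem.Set.ofList dA.keys) dB.keys) := by
    rw [List.perm_ext_iff_of_nodup (PySem.List.nodup_dedup _)
      (PySem.Set.nodup_union _ _ (PySem.Set.nodup_ofList _))]
    intro t
    rw [PySem.List.mem_dedup, PySem.Set.mem_union, PySem.Set.mem_ofList,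
      hdA, hdB, pv_keys_sumDict tagsA sizeA, pv_keys_sumDict tagsB sizeB,
      PySem.Set.mem_ofList, PySem.Set.mem_ofList, List.mem_append]
  rw [(hperm.map g).sum_eq]
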